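-- pv_equiv track=rewrite | github.com/mtkbirdman/mtkbirdman.com | NURBS/mybspline.py | _remove_kink_from_knot
-- ===== SOURCE A (Python) =====
-- def _remove_kink_from_knot(knot_vector, k):
--     """
--     ノットベクトルから不要な重複（キンク）を除去する関数。
--     ただし、先頭と末尾の k 個のノットは保持する（open uniform knot の境界条件を維持するため）。
--
--     Parameters:
--         knot_vector (list or array): 元のノットベクトル
--         k (int): Bスプラインの次数（境界部のノット数を決定する）
--
--     Returns:
--         cleaned_knot_vector (list): 重複を除去したノットベクトル
--         duplicates (list): 除去された重複ノットの一覧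
--     """
--
--     # --- 境界部のノットを保持（open uniform knot の条件） ---
--     # 先頭 k 個と末尾 k 個のノットはそのまま残す
--     head = knot_vector[:k]      # 例： [0, 0, 0]（k=3 の場合）
--     tail = knot_vector[-k:]     # 例： [1, 1, 1]
--
--     # --- 中央部分のノットを抽出（重複除去対象） ---
--     middle = knot_vector[k:-k]  # 境界部を除いたノット列
--
--     # --- 重複除去処理（順序を保持しながら重複を除去） ---
--     seen = set()                # すでに出現したノット値を記録する集合
--     cleaned_middle = []         # 重複を除去した中央ノット列
--     duplicates = []             # 除去された重複ノットの記録
--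
--     for val in middle:
--         if val not in seen:
--             seen.add(val)           # 初出の値は記録して保持
--             cleaned_middle.append(val)
--         else:
--             duplicates.append(val)  # 重複していた値は記録のみ（除去）
--
--     # --- 最終的なノットベクトルを構築 ---
--     # 境界部 + 重複除去済み中央部 + 境界部（末尾）
--     cleaned_knot_vector = head + cleaned_middle + tail
--
--     # --- 結果を返す ---
--     return cleaned_knot_vector, duplicates
-- ===== SOURCE B (Python) =====
-- def _remove_kink_from_knot(knot_vector, k):
--     # Same boundary slicing as A; instead of a one-pass seen-set loop, build a
--     # first-occurrence-index map (reversed inserts, so earliest index wins) and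
--     # classify each middle element positionally by two comprehensions.
--     head = knot_vector[:k]
--     tail = knot_vector[-k:]
--     middle = knot_vector[k:-k]
--     first = {v: i for i, v in reversed(list(enumerate(middle)))}
--     cleaned_middle = [v for i, v in enumerate(middle) if first[v] == i]
--     duplicates = [v for i, v in enumerate(middle) if first[v] != i]
--     return head + cleaned_middle + tail, duplicates
-- ===== Notes on version B (the rewrite author's own statement) =====
-- stated objective: alternative
-- what changed: The stateful seen-set loop with two accumulators is replaced by a reverse-built first-occurrence-index dict comprehension followed by two positional comprehensions that classify each middle element as first or later occurrence.
import Mathlib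
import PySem

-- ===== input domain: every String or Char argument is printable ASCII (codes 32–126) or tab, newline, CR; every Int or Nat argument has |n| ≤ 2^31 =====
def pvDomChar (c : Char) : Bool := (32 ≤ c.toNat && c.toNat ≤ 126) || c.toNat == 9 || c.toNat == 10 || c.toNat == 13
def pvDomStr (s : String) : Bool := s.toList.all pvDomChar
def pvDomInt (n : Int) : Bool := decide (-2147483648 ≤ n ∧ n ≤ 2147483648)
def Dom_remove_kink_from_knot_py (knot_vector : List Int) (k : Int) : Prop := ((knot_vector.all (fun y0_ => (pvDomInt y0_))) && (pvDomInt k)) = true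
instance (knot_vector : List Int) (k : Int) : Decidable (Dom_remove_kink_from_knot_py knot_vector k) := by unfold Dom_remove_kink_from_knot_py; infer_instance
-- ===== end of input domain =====

-- B replaces A's one-pass seen-set loop by two index-based comprehensions
-- (first-or-later occurrence decided by list.index); objective: idiomatic, not faster.

-- ===== PORT A =====
def remove_kink_from_knot_py (knot_vector : List Int) (k : Int) : List Int × List Int :=
  let head := PySem.List.slice knot_vector none (some k)
  let tail := PySem.List.slice knot_vector (some (-k)) none
  let middle := PySem.List.slice knot_vector (some k) (some (-k))
  -- for val in middle: if val not in seen: seen.add(val); cleaned_middle.append(val) else duplicates.append(val)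
  let res := middle.foldl
    (fun (st : PySem.Set Int × List Int × List Int) val =>
      if !(PySem.Set.contains st.1 val) then
        (PySem.Set.add st.1 val, st.2.1 ++ [val], st.2.2)
      else
        (st.1, st.2.1, st.2.2 ++ [val]))
    ((PySem.Set.empty : PySem.Set Int), ([] : List Int), ([] : List Int))
  (head ++ res.2.1 ++ tail, res.2.2)

-- ===== PORT B =====
-- first = {v: i for i, v in reversed(list(enumerate(middle)))}
def bspline_first (middle : List Int) : PySem.Dict Int Int :=
  ((PySem.List.enumerate middle 0).reverse).foldl (fun d p => d.insert p.2 p.1) PySem.Dict.empty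

def remove_kink_from_knot_py_alt (knot_vector : List Int) (k : Int) : List Int × List Int :=
  let head := PySem.List.slice knot_vector none (some k)
  let tail := PySem.List.slice knot_vector (some (-k)) none
  let middle := PySem.List.slice knot_vector (some k) (some (-k))
  let first := bspline_first middle
  let cleaned_middle := ((PySem.List.enumerate middle 0).filter (fun p => first.get? p.2 == some p.1)).map (·.2)
  let duplicates := ((PySem.List.enumerate middle 0).filter (fun p => !(first.get? p.2 == some p.1))).map (·.2)
  (head ++ cleaned_middle ++ tail, duplicates)

-- ===== PRECONDITION & SPEC =====
def Spec_remove_kink_from_knot_py (knot_vector : List Int) (k : Int) (out : List Int × List Int) : Prop := out = remove_kink_from_knot_py_alt knot_vector k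
instance (knot_vector : List Int) (k : Int) (out : List Int × List Int) : Decidable (Spec_remove_kink_from_knot_py knot_vector k out) := by unfold Spec_remove_kink_from_knot_py; infer_instance

-- ===== CLAIM (what is proved, stated in full; the proofs are below) =====
def Claim_equal_remove_kink_from_knot_py : Prop := ∀ (knot_vector : List Int) (k : Int), Dom_remove_kink_from_knot_py knot_vector k → Spec_remove_kink_from_knot_py knot_vector k (remove_kink_from_knot_py knot_vector k)

-- ===== LEMMAS AND PROOFS =====

-- Proof-side reformulation of the comprehension condition via list.index.
def bspline_first_occ (middle : List Int) (p : Int × Int) : Bool :=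
  (PySem.List.index? middle p.2).map (fun n => (n : Int)) == some p.1

-- The reverse-built dict maps each value to its first-occurrence index.
theorem bspline_first_get? (l : List Int) : ∀ (s : Nat) (v : Int),
    (((PySem.List.enumerate l (s : Int)).reverse).foldl (fun d p => d.insert p.2 p.1)
        (PySem.Dict.empty : PySem.Dict Int Int)).get? v
      = (PySem.List.index? l v).map (fun n => ((s + n : Nat) : Int)) := by
  induction l with
  | nil => intro s v; simp [PySem.List.enumerate]
  | cons x rest ih =>
    intro s v
    rw [PySem.List.enumerate_cons, show ((s : Int) + 1) = (((s + 1 : Nat)) : Int) by push_cast; ring]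
    rw [List.foldl_reverse]
    rw [List.foldr_cons, PySem.Dict.get?_insert]
    have ih' := ih (s + 1) v
    rw [List.foldl_reverse] at ih'
    by_cases hvx : v = x
    · subst hvx
      rw [if_pos rfl, PySem.List.index?_cons_self]
      simp
    · rw [if_neg hvx, ih', PySem.List.index?_cons_of_ne rest (Ne.symm hvx)]
      cases PySem.List.index? rest v with
      | none => simp
      | some n => simp; ring


-- Proof-side reference splitter: (first occurrences, later occurrences) of l
-- relative to an already-seen prefix pre.
def kinkSplit (pre : List Int) : List Int → List Int × List Int
  | [] => ([], [])
  | v :: rest =>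
    let r := kinkSplit (pre ++ [v]) rest
    if v ∈ pre then (r.1, v :: r.2) else (v :: r.1, r.2)

-- A's loop computes kinkSplit.
theorem foldlA_eq_kinkSplit (l : List Int) : ∀ (pre c d : List Int),
    l.foldl
      (fun (st : PySem.Set Int × List Int × List Int) val =>
        if !(PySem.Set.contains st.1 val) then
          (PySem.Set.add st.1 val, st.2.1 ++ [val], st.2.2)
        else
          (st.1, st.2.1, st.2.2 ++ [val]))
      (PySem.Set.ofList pre, c, d)
    = (PySem.Set.ofList (pre ++ l), c ++ (kinkSplit pre l).1, d ++ (kinkSplit pre l).2) := by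
  induction l with
  | nil => intro pre c d; simp [kinkSplit]
  | cons v rest ih =>
    intro pre c d
    by_cases hv : v ∈ pre
    · have hcon : PySem.Set.contains (PySem.Set.ofList pre) v = true := by
        rw [PySem.Set.contains_eq_decide]
        simp [PySem.Set.mem_ofList, hv]
      have hadd : PySem.Set.ofList (pre ++ [v]) = PySem.Set.ofList pre := by
        rw [PySem.Set.ofList_append_singleton, PySem.Set.add_of_mem]
        simp [PySem.Set.mem_ofList, hv]
      have hstep : List.foldl
          (fun (st : PySem.Set Int × List Int × List Int) val =>
            if !(PySem.Set.contains st.1 val) then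
              (PySem.Set.add st.1 val, st.2.1 ++ [val], st.2.2)
            else
              (st.1, st.2.1, st.2.2 ++ [val]))
          (PySem.Set.ofList pre, c, d) (v :: rest)
        = List.foldl
          (fun (st : PySem.Set Int × List Int × List Int) val =>
            if !(PySem.Set.contains st.1 val) then
              (PySem.Set.add st.1 val, st.2.1 ++ [val], st.2.2)
            else
              (st.1, st.2.1, st.2.2 ++ [val]))
          (PySem.Set.ofList (pre ++ [v]), c, d ++ [v]) rest := by
        rw [List.foldl_cons]
        congr 1
        simp [hadd, hv]
      rw [hstep, ih (pre ++ [v]) c (d ++ [v])]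
      simp [kinkSplit, hv, List.append_assoc]
    · have hstep : List.foldl
          (fun (st : PySem.Set Int × List Int × List Int) val =>
            if !(PySem.Set.contains st.1 val) then
              (PySem.Set.add st.1 val, st.2.1 ++ [val], st.2.2)
            else
              (st.1, st.2.1, st.2.2 ++ [val]))
          (PySem.Set.ofList pre, c, d) (v :: rest)
        = List.foldl
          (fun (st : PySem.Set Int × List Int × List Int) val =>
            if !(PySem.Set.contains st.1 val) then
              (PySem.Set.add st.1 val, st.2.1 ++ [val], st.2.2)
            else
              (st.1, st.2.1, st.2.2 ++ [val]))
          (PySem.Set.ofList (pre ++ [v]), c ++ [v], d) rest := by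
        rw [List.foldl_cons]
        congr 1
        simp [PySem.Set.ofList_append_singleton, hv]
      rw [hstep, ih (pre ++ [v]) (c ++ [v]) d]
      simp [kinkSplit, hv, List.append_assoc]

-- On the head element of the remaining suffix, Source B's condition decides
-- membership in the already-scanned prefix.
theorem first_occ_head (pre rest : List Int) (v : Int) :
    bspline_first_occ (pre ++ v :: rest) ((pre.length : Int), v) = !(decide (v ∈ pre)) := by
  by_cases hv : v ∈ pre
  · have h1 : PySem.List.index? (pre ++ v :: rest) v = PySem.List.index? pre v :=
      PySem.List.index?_append_of_mem (v :: rest) hv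
    obtain ⟨n, hn⟩ := Option.isSome_iff_exists.mp ((PySem.List.index?_isSome_iff pre v).mpr hv)
    obtain ⟨hk, -, -⟩ := PySem.List.getElem_of_index?_eq_some hn
    simp only [bspline_first_occ, h1, hn, hv, decide_true, Bool.not_true]
    simp only [beq_eq_false_iff_ne, ne_eq]
    intro h
    simp at h
    omega
  · have h1 : PySem.List.index? ((pre ++ [v]) ++ rest) v = PySem.List.index? (pre ++ [v]) v :=
      PySem.List.index?_append_of_mem rest (by simp)
    have h2 : PySem.List.index? (pre ++ [v]) v = some pre.length :=
      PySem.List.index?_append_singleton_self pre v hv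
    have h3 : pre ++ v :: rest = (pre ++ [v]) ++ rest := by simp
    simp only [bspline_first_occ]
    rw [h3, h1, h2]
    simp [hv]

-- B's two filters compute kinkSplit.
theorem filterB_eq_kinkSplit (l : List Int) : ∀ (pre m : List Int), m = pre ++ l →
    (((PySem.List.enumerate l (pre.length : Int)).filter (fun p => bspline_first_occ m p)).map (·.2)
        = (kinkSplit pre l).1)
    ∧ (((PySem.List.enumerate l (pre.length : Int)).filter (fun p => !(bspline_first_occ m p))).map (·.2)
        = (kinkSplit pre l).2) := by
  induction l with
  | nil => intro pre m _; simp [kinkSplit, PySem.List.enumerate]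
  | cons v rest ih =>
    intro pre m hm
    have hlen : (pre.length : Int) + 1 = ((pre ++ [v]).length : Int) := by simp
    have hm' : m = (pre ++ [v]) ++ rest := by simp [hm]
    obtain ⟨ih1, ih2⟩ := ih (pre ++ [v]) m hm'
    rw [PySem.List.enumerate_cons, hlen]
    by_cases hv : v ∈ pre
    · have hfo : bspline_first_occ m ((pre.length : Int), v) = false := by
        rw [hm, first_occ_head pre rest v]; simp [hv]
      constructor
      · rw [List.filter_cons_of_neg (by simp [hfo])]
        simpa [kinkSplit, hv] using ih1
      · rw [List.filter_cons_of_pos (by simp [hfo]), List.map_cons]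
        simpa [kinkSplit, hv] using congrArg (v :: ·) ih2
    · have hfo : bspline_first_occ m ((pre.length : Int), v) = true := by
        rw [hm, first_occ_head pre rest v]; simp [hv]
      constructor
      · rw [List.filter_cons_of_pos (by simp [hfo]), List.map_cons]
        simpa [kinkSplit, hv] using congrArg (v :: ·) ih1
      · rw [List.filter_cons_of_neg (by simp [hfo])]
        simpa [kinkSplit, hv] using ih2

-- ===== VERDICT (by name: the statement is the Claim_ definition above) =====
theorem remove_kink_from_knot_py_spec : Claim_equal_remove_kink_from_knot_py := by
  intro knot_vector k _
  unfold Spec_remove_kink_from_knot_py remove_kink_from_knot_py remove_kink_from_knot_py_alt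
  set middle := PySem.List.slice knot_vector (some k) (some (-k)) with hmid
  have hcond : ∀ (p : Int × Int), ((bspline_first middle).get? p.2 == some p.1)
      = bspline_first_occ middle p := by
    intro p
    rw [bspline_first, show ((0 : Int)) = ((0 : Nat) : Int) by norm_num,
      bspline_first_get? middle 0 p.2, bspline_first_occ]
    cases PySem.List.index? middle p.2 <;> simp
  have hA := foldlA_eq_kinkSplit middle [] [] []
  obtain ⟨hB1, hB2⟩ := filterB_eq_kinkSplit middle [] middle rfl
  simp only [List.length_nil, Nat.cast_zero] at hB1 hB2
  simp only [PySem.Set.ofList, List.nil_append, List.foldl_nil] at hA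
  simp only [hcond, hA, hB1, hB2]
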